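-- pv_equiv track=rewrite | github.com/FooKeTing/Manufacturing-Aging-Traceability-System | app/func.py | get_hb_bin
-- ===== SOURCE A (Python) =====
-- def get_hb_bin(hb_sn_list, trace_bin_dict):
--     bins = [
--         trace_bin_dict.get(str(sn).strip())
--         for sn in hb_sn_list
--         if sn
--     ]
--
--     bins = [b for b in bins if b is not None]
--
--     if len(bins) == 0:
--         return None
--     elif len(set(bins)) == 1:
--         return bins[0]
--     else:
--         return "MIXED"
-- ===== SOURCE B (Python) =====
-- def get_hb_bin(hb_sn_list, trace_bin_dict):
--     common = None
--     for sn in hb_sn_list: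
--         if not sn:
--             continue
--         b = trace_bin_dict.get(str(sn).strip())
--         if b is None:
--             continue
--         if common is None:
--             common = b
--         elif b != common:
--             return "MIXED"
--     return common
-- ===== Notes on version B (the rewrite author's own statement) =====
-- stated objective: alternative
-- what changed: Replaces A's three-pass pipeline (build bin list, filter None, measure set cardinality) with a single streaming pass keeping one 'common' bin and returning 'MIXED' on the first mismatch.
import Mathlib
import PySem

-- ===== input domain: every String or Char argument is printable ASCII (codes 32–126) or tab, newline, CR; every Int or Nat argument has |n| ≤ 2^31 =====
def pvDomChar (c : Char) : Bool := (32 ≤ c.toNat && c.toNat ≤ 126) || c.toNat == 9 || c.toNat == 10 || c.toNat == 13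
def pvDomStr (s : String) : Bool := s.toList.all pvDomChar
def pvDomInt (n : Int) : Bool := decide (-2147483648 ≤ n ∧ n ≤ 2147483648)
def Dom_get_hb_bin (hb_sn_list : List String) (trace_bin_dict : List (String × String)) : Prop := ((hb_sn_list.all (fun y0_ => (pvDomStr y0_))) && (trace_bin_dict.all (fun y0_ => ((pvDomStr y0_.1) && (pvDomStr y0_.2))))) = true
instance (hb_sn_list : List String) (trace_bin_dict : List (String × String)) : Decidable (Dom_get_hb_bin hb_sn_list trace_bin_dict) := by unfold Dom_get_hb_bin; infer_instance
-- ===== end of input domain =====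

-- B replaces A's three-pass pipeline (build bin list, drop Nones, measure the set) with one
-- streaming pass that keeps a single 'common' bin and returns "MIXED" at the first mismatch (objective: alternative).

-- ===== PORT A =====
def get_hb_bin (hb_sn_list : List String) (trace_bin_dict : List (String × String)) : Option String :=
  let bins : List (Option String) :=
    (hb_sn_list.filter (fun sn => sn != "")).map
      (fun sn => (PySem.Dict.mk trace_bin_dict).get? (PySem.Str.strip sn))
  let bins2 : List String := bins.filterMap id   -- [b for b in bins if b is not None]
  match bins2 with
  | [] => none
  | b :: rest =>
      if (PySem.Set.ofList (b :: rest)).length = 1 then some b else some "MIXED"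

-- ===== PORT B =====
def altLoop (d : List (String × String)) : List String → Option String → Option String
  | [], common => common
  | sn :: rest, common =>
    if sn == "" then altLoop d rest common
    else
      match (PySem.Dict.mk d).get? (PySem.Str.strip sn) with
      | none => altLoop d rest common
      | some b =>
        match common with
        | none => altLoop d rest (some b)
        | some c => if b == c then altLoop d rest common else some "MIXED"

def get_hb_bin_alt (hb_sn_list : List String) (trace_bin_dict : List (String × String)) : Option String :=
  altLoop trace_bin_dict hb_sn_list none

-- ===== PRECONDITION & SPEC =====
def Spec_get_hb_bin (hb_sn_list : List String) (trace_bin_dict : List (String × String)) (out : Option String) : Prop := out = get_hb_bin_alt hb_sn_list trace_bin_dict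
instance (hb_sn_list : List String) (trace_bin_dict : List (String × String)) (out : Option String) : Decidable (Spec_get_hb_bin hb_sn_list trace_bin_dict out) := by unfold Spec_get_hb_bin; infer_instance

-- ===== CLAIM (what is proved, stated in full; the proofs are below) =====
def Claim_equal_get_hb_bin : Prop := ∀ (hb_sn_list : List String) (trace_bin_dict : List (String × String)), Dom_get_hb_bin hb_sn_list trace_bin_dict → Spec_get_hb_bin hb_sn_list trace_bin_dict (get_hb_bin hb_sn_list trace_bin_dict)

-- ===== LEMMAS AND PROOFS =====

/-- The per-serial resolution both programs perform: skip empty, look up the stripped serial. -/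
def resolveBin (d : List (String × String)) (sn : String) : Option String :=
  if sn == "" then none else (PySem.Dict.mk d).get? (PySem.Str.strip sn)

theorem resolveBin_empty (d : List (String × String)) (sn : String) (h : sn = "") :
    resolveBin d sn = none := by simp [resolveBin, h]

theorem resolveBin_ne (d : List (String × String)) (sn : String) (h : ¬ sn = "") :
    resolveBin d sn = (PySem.Dict.mk d).get? (PySem.Str.strip sn) := by simp [resolveBin, h]

theorem bins2_eq_filterMap (d : List (String × String)) (l : List String) :
    ((l.filter (fun sn => sn != "")).map
      (fun sn => (PySem.Dict.mk d).get? (PySem.Str.strip sn))).filterMap id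
      = l.filterMap (resolveBin d) := by
  induction l with
  | nil => rfl
  | cons sn rest ih =>
    rw [List.filterMap_cons]
    by_cases h : sn = ""
    · rw [resolveBin_empty d sn h]
      simpa [List.filter_cons, h] using ih
    · rw [resolveBin_ne d sn h]
      have hb : (sn != "") = true := by simp [h]
      simp only [List.filter_cons, hb, if_pos, List.map_cons, List.filterMap_cons, id]
      cases (PySem.Dict.mk d).get? (PySem.Str.strip sn) <;>
        simpa [List.filterMap_map, Function.comp] using ih

theorem altLoop_some (d : List (String × String)) (l : List String) (c : String) :
    altLoop d l (some c)
      = if (l.filterMap (resolveBin d)).all (· == c) then some c else some "MIXED" := by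
  induction l with
  | nil => simp [altLoop]
  | cons sn rest ih =>
    rw [List.filterMap_cons]
    by_cases h : sn = ""
    · rw [resolveBin_empty d sn h]
      simpa [altLoop, h] using ih
    · rw [resolveBin_ne d sn h]
      have hne : (sn == "") = false := by simp [h]
      simp only [altLoop, hne, Bool.false_eq_true, if_neg, not_false_eq_true]
      cases hg : (PySem.Dict.mk d).get? (PySem.Str.strip sn) with
      | none => exact ih
      | some b =>
        by_cases hb : b = c
        · simpa [hb] using ih
        · have hbc : (b == c) = false := by simp [hb]
          simp [hbc, List.all_cons]

theorem altLoop_none (d : List (String × String)) (l : List String) :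
    altLoop d l none
      = match l.filterMap (resolveBin d) with
        | [] => none
        | b :: bs => if bs.all (· == b) then some b else some "MIXED" := by
  induction l with
  | nil => rfl
  | cons sn rest ih =>
    rw [List.filterMap_cons]
    by_cases h : sn = ""
    · rw [resolveBin_empty d sn h]
      simpa [altLoop, h] using ih
    · rw [resolveBin_ne d sn h]
      have hne : (sn == "") = false := by simp [h]
      simp only [altLoop, hne, Bool.false_eq_true, if_neg, not_false_eq_true]
      cases hg : (PySem.Dict.mk d).get? (PySem.Str.strip sn) with
      | none => exact ih
      | some b => exact altLoop_some d rest b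

theorem nodup_all_eq_length_le_one {α : Type} (l : List α) (b : α)
    (hnd : l.Nodup) (hall : ∀ x ∈ l, x = b) : l.length ≤ 1 := by
  match l with
  | [] => simp
  | [x] => simp
  | x :: y :: t =>
    exfalso
    have hx : x = b := hall x (by simp)
    have hy : y = b := hall y (by simp)
    rw [List.nodup_cons] at hnd
    exact hnd.1 (by simp [hx, hy])

theorem set_len_one_iff (b : String) (bs : List String) :
    (PySem.Set.ofList (b :: bs)).length = 1 ↔ bs.all (· == b) = true := by
  constructor
  · intro h1
    rw [List.all_eq_true]
    intro x hx
    have hmem : x ∈ PySem.Set.ofList (b :: bs) := by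
      rw [PySem.Set.mem_ofList]; exact List.mem_cons_of_mem _ hx
    have hb : b ∈ PySem.Set.ofList (b :: bs) := by
      rw [PySem.Set.mem_ofList]; exact List.mem_cons_self ..
    match hs : PySem.Set.ofList (b :: bs) with
    | [] => rw [hs] at hb; simp at hb
    | [y] =>
      rw [hs] at hmem hb
      simp only [List.mem_singleton] at hmem hb
      simp [hmem, hb]
    | y :: z :: t => rw [hs] at h1; simp at h1
  · intro hall
    have hsub : ∀ x ∈ PySem.Set.ofList (b :: bs), x = b := by
      intro x hx
      rw [PySem.Set.mem_ofList] at hx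
      rcases List.mem_cons.mp hx with h | h
      · exact h
      · simpa using (List.all_eq_true.mp hall) x h
    have hle : (PySem.Set.ofList (b :: bs)).length ≤ 1 :=
      nodup_all_eq_length_le_one _ b (PySem.Set.nodup_ofList _) hsub
    have hpos : 0 < (PySem.Set.ofList (b :: bs)).length := by
      have hb : b ∈ PySem.Set.ofList (b :: bs) := by
        rw [PySem.Set.mem_ofList]; exact List.mem_cons_self ..
      exact List.length_pos_of_mem hb
    omega

-- ===== VERDICT (by name: the statement is the Claim_ definition above) =====
theorem get_hb_bin_spec : Claim_equal_get_hb_bin := by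
  intro l d _
  unfold Spec_get_hb_bin get_hb_bin get_hb_bin_alt
  simp only [bins2_eq_filterMap, altLoop_none]
  cases h : l.filterMap (resolveBin d) with
  | nil => rfl
  | cons b bs =>
    by_cases hall : bs.all (· == b) = true
    · simp only []
      rw [if_pos ((set_len_one_iff b bs).mpr hall), if_pos hall]
    · simp only []
      rw [if_neg (fun hc => hall ((set_len_one_iff b bs).mp hc)), if_neg hall]
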